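-- pv_equiv track=rewrite | github.com/AbdoKujo/Snake-AI | game/game_state.py | _bfs_count
-- ===== SOURCE A (Python) =====
-- from collections import deque
-- from typing import Tuple, List, Optional, Set
--
-- def _bfs_count(sx: int, sy: int,
--                obstacles: Set[tuple], gw: int, gh: int) -> int:
--     """Count reachable empty cells from (sx,sy). Returns 0 if blocked."""
--     if not (0 <= sx < gw and 0 <= sy < gh) or (sx, sy) in obstacles:
--         return 0
--     visited: Set[tuple] = {(sx, sy)}
--     queue: deque = deque([(sx, sy)])
--     count = 0
--     while queue:
--         x, y = queue.popleft()
--         for nx, ny in ((x, y - 1), (x, y + 1), (x - 1, y), (x + 1, y)):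
--             if 0 <= nx < gw and 0 <= ny < gh:
--                 pos = (nx, ny)
--                 if pos not in obstacles and pos not in visited:
--                     visited.add(pos)
--                     queue.append(pos)
--                     count += 1
--     return count
-- ===== SOURCE B (Python) =====
-- def _bfs_count(sx: int, sy: int,
--                obstacles, gw: int, gh: int) -> int:
--     """Count reachable empty cells from (sx,sy) by iterating the neighbour
--     expansion to a fixed point instead of running a queue-based BFS."""
--     if not (0 <= sx < gw and 0 <= sy < gh) or (sx, sy) in obstacles:
--         return 0
--     reach = {(sx, sy)}
--     while True:
--         grown = {(x + dx, y + dy)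
--                  for (x, y) in reach
--                  for (dx, dy) in ((0, -1), (0, 1), (-1, 0), (1, 0))}
--         grown = {(x, y) for (x, y) in grown
--                  if 0 <= x < gw and 0 <= y < gh
--                  and (x, y) not in obstacles and (x, y) not in reach}
--         if not grown:
--             return len(reach) - 1
--         reach |= grown
-- ===== Notes on version B (the rewrite author's own statement) =====
-- stated objective: alternative
-- what changed: Replaces the queue-based BFS with per-cell count increments by an iterate-to-fixed-point closure: each round the whole reachable set is expanded by its in-bounds, non-obstacle neighbours until nothing new appears, and the answer is len(reach)-1.
import Mathlib
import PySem

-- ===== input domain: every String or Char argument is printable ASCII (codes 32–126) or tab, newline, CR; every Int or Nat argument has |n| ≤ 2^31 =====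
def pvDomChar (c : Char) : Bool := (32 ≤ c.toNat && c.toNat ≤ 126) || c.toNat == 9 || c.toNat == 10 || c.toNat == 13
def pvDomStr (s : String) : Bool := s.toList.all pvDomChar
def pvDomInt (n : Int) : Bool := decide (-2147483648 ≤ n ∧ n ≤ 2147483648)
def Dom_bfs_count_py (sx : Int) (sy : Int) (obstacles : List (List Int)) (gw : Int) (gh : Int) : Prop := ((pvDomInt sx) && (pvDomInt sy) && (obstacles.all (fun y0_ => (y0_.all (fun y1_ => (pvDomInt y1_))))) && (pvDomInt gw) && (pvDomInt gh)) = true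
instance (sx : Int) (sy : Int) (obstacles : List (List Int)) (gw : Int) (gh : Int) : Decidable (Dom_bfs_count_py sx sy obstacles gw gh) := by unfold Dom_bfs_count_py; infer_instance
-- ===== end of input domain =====

-- B replaces A's queue-based BFS (one cell popped at a time, count incremented per discovery)
-- by an iterate-to-fixed-point neighbour closure returning len(reach)-1 (objective: alternative).

-- shared small helpers (both Pythons build the same 4-neighbour tuple list and the same bounds/obstacle tests)
def pvNbrs (c : Int × Int) : List (Int × Int) := [(c.1, c.2 - 1), (c.1, c.2 + 1), (c.1 - 1, c.2), (c.1 + 1, c.2)]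

def pvInB (gw : Int) (gh : Int) (c : Int × Int) : Bool := decide (0 ≤ c.1 ∧ c.1 < gw ∧ 0 ≤ c.2 ∧ c.2 < gh)

def pvObs (obstacles : List (List Int)) (c : Int × Int) : Bool := obstacles.contains [c.1, c.2]

-- termination-measure helpers (proof-only; never evaluated at run time)
def pvCells (gw : Int) (gh : Int) : List (Int × Int) :=
  (List.range gw.toNat).flatMap fun (i : Nat) => (List.range gh.toNat).map fun (j : Nat) => ((i : Int), (j : Int))

def pvUnv (gw : Int) (gh : Int) (v : List (Int × Int)) : Nat :=
  ((pvCells gw gh).filter (fun c => decide (c ∉ v))).length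

theorem pvCells_nodup (gw gh : Int) : (pvCells gw gh).Nodup := by
  unfold pvCells
  rw [List.nodup_flatMap]
  constructor
  · intro i _
    exact List.nodup_range.map (fun a b h => by simpa using congrArg Prod.snd h)
  · refine List.Pairwise.imp ?_ List.nodup_range
    intro a b hab
    intro x hxa hxb
    simp only [List.mem_map] at hxa hxb
    obtain ⟨j1, _, rfl⟩ := hxa
    obtain ⟨j2, _, heq⟩ := hxb
    have hfst := congrArg Prod.fst heq
    simp only at hfst
    exact hab (by exact_mod_cast hfst.symm)

theorem pvMem_cells (gw gh : Int) (c : Int × Int) :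
    c ∈ pvCells gw gh ↔ pvInB gw gh c = true := by
  unfold pvCells pvInB
  simp only [List.mem_flatMap, List.mem_map, List.mem_range, decide_eq_true_eq]
  constructor
  · rintro ⟨i, hi, j, hj, rfl⟩
    dsimp only
    omega
  · rintro ⟨h1, h2, h3, h4⟩
    obtain ⟨cx, cy⟩ := c
    simp only at h1 h2 h3 h4
    exact ⟨cx.toNat, by omega, cy.toNat, by omega, by simp only [Prod.mk.injEq]; omega⟩

-- a nodup list's filter shrinks by exactly one when one satisfying element is excluded
theorem pvFilter_drop {α : Type} [DecidableEq α] (p : α → Bool) (n : α) (xs : List α)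
    (hnd : xs.Nodup) (hmem : n ∈ xs) (hp : p n = true) :
    (xs.filter (fun c => p c && decide (c ≠ n))).length + 1 = (xs.filter p).length := by
  have h3 : n ∈ xs.filter p := List.mem_filter.mpr ⟨hmem, hp⟩
  have h2 : (xs.filter p).erase n = (xs.filter p).filter (fun c => decide (c ≠ n)) := by
    rw [(hnd.filter p).erase_eq_filter n]
    apply List.filter_congr; intro c _
    by_cases hcn : c = n
    · subst hcn; simp
    · simp [hcn]
  have h1 : (xs.filter p).filter (fun c => decide (c ≠ n)) =
      xs.filter (fun c => p c && decide (c ≠ n)) := by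
    rw [List.filter_filter]
    apply List.filter_congr; intro c _; rw [Bool.and_comm]
  have h4 : ((xs.filter p).erase n).length = (xs.filter p).length - 1 :=
    List.length_erase_of_mem h3
  have h7 : 0 < (xs.filter p).length := List.length_pos_of_ne_nil (List.ne_nil_of_mem h3)
  rw [show (xs.filter fun c => p c && decide (c ≠ n)) = (xs.filter p).erase n from by
    rw [h2, h1]]
  omega

theorem pvUnv_append (gw gh : Int) (v : List (Int × Int)) (n : Int × Int)
    (h1 : pvInB gw gh n = true) (h2 : n ∉ v) :
    pvUnv gw gh (v ++ [n]) + 1 = pvUnv gw gh v := by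
  unfold pvUnv
  have hmem : n ∈ pvCells gw gh := (pvMem_cells gw gh n).mpr h1
  have hdrop := pvFilter_drop (fun c => decide (c ∉ v)) n (pvCells gw gh)
    (pvCells_nodup gw gh) hmem (by simp [h2])
  have heq : (pvCells gw gh).filter (fun c => decide (c ∉ v ++ [n])) =
      (pvCells gw gh).filter (fun c => decide (c ∉ v) && decide (c ≠ n)) := by
    apply List.filter_congr
    intro c _
    by_cases h : c = n
    · subst h; simp
    · simp [List.mem_append, h]
  rw [heq]
  exact hdrop

-- ===== PORT A =====
-- one neighbour of A's inner for-loop: add to visited, enqueue, bump count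
def pvStepA (obstacles : List (List Int)) (gw gh : Int)
    (st : List (Int × Int) × List (Int × Int) × Int) (n : Int × Int) :
    List (Int × Int) × List (Int × Int) × Int :=
  if pvInB gw gh n && !pvObs obstacles n && !st.1.contains n then
    (st.1 ++ [n], st.2.1 ++ [n], st.2.2 + 1)
  else st

def pvMuA (gw gh : Int) (st : List (Int × Int) × List (Int × Int) × Int) : Nat :=
  pvUnv gw gh st.1 + st.2.1.length

theorem pvStepA_mu (obstacles : List (List Int)) (gw gh : Int)
    (st : List (Int × Int) × List (Int × Int) × Int) (n : Int × Int) :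
    pvMuA gw gh (pvStepA obstacles gw gh st n) = pvMuA gw gh st := by
  unfold pvStepA pvMuA
  split
  · next h =>
    simp only [Bool.and_eq_true, Bool.not_eq_true'] at h
    have hnm : n ∉ st.1 := by
      intro hm
      have h2 := h.2
      rw [List.contains_eq_mem] at h2
      simp [hm] at h2
    have := pvUnv_append gw gh st.1 n h.1.1 hnm
    simp only [List.length_append, List.length_cons, List.length_nil]
    omega
  · rfl

theorem pvFoldA_mu (obstacles : List (List Int)) (gw gh : Int) :
    ∀ (ns : List (Int × Int)) (st : List (Int × Int) × List (Int × Int) × Int),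
      pvMuA gw gh (List.foldl (pvStepA obstacles gw gh) st ns) = pvMuA gw gh st := by
  intro ns
  induction ns with
  | nil => intro st; rfl
  | cons n ns ih => intro st; rw [List.foldl_cons, ih, pvStepA_mu]

-- A's while-loop; state = (visited, queue, count); returns (visited, count)
def pvLoopA (obstacles : List (List Int)) (gw gh : Int) :
    List (Int × Int) → List (Int × Int) → Int → List (Int × Int) × Int
  | v, [], c => (v, c)
  | v, x :: qs, c =>
    let st := List.foldl (pvStepA obstacles gw gh) (v, qs, c) (pvNbrs x)
    pvLoopA obstacles gw gh st.1 st.2.1 st.2.2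
termination_by v q _ => pvUnv gw gh v + q.length
decreasing_by
  have hmu := pvFoldA_mu obstacles gw gh (pvNbrs x) (v, qs, c)
  unfold pvMuA at hmu
  have hlc : (x :: qs).length = qs.length + 1 := List.length_cons ..
  dsimp only at hmu ⊢
  omega

def bfs_count_py (sx : Int) (sy : Int) (obstacles : List (List Int)) (gw : Int) (gh : Int) : Int :=
  if ¬(0 ≤ sx ∧ sx < gw ∧ 0 ≤ sy ∧ sy < gh) ∨ [sx, sy] ∈ obstacles then 0
  else (pvLoopA obstacles gw gh [(sx, sy)] [(sx, sy)] 0).2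

-- ===== PORT B =====
-- the filtered 'grown' set of one expansion round (a Python set: distinct elements)
def pvGrow (obstacles : List (List Int)) (gw gh : Int) (reach : List (Int × Int)) : List (Int × Int) :=
  PySem.Set.ofList ((reach.flatMap pvNbrs).filter
    (fun n => pvInB gw gh n && !pvObs obstacles n && !reach.contains n))

theorem pvGrow_sub (obstacles : List (List Int)) (gw gh : Int) (reach : List (Int × Int)) :
    ∀ n ∈ pvGrow obstacles gw gh reach, pvInB gw gh n = true ∧ n ∉ reach := by
  intro n hn
  unfold pvGrow at hn
  rw [PySem.Set.mem_ofList] at hn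
  have hf := List.of_mem_filter hn
  simp only [Bool.and_eq_true, Bool.not_eq_true'] at hf
  refine ⟨hf.1.1, ?_⟩
  intro hm
  have h2 := hf.2
  rw [List.contains_eq_mem] at h2
  simp [hm] at h2

theorem pvUnv_append_list (gw gh : Int) :
    ∀ (l reach : List (Int × Int)), l.Nodup →
      (∀ x ∈ l, pvInB gw gh x = true ∧ x ∉ reach) →
      pvUnv gw gh (reach ++ l) + l.length = pvUnv gw gh reach := by
  intro l
  induction l with
  | nil => intro reach _ _; simp
  | cons x xs ih =>
    intro reach hnd hall
    rw [List.nodup_cons] at hnd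
    have h1 := hall x (by simp)
    have step := pvUnv_append gw gh reach x h1.1 h1.2
    have ih' := ih (reach ++ [x]) hnd.2 (by
      intro y hy
      have hy' := hall y (by simp [hy])
      refine ⟨hy'.1, ?_⟩
      simp only [List.mem_append, List.mem_singleton]
      rintro (h | rfl)
      · exact hy'.2 h
      · exact hnd.1 hy)
    have hsplit : reach ++ x :: xs = (reach ++ [x]) ++ xs := by simp
    rw [hsplit]
    simp only [List.length_cons]
    omega

def pvLoopB (obstacles : List (List Int)) (gw gh : Int) (reach : List (Int × Int)) : Int :=
  let grown := pvGrow obstacles gw gh reach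
  if grown = [] then (reach.length : Int) - 1
  else pvLoopB obstacles gw gh (reach ++ grown)
termination_by pvUnv gw gh reach
decreasing_by
  have hnd : (pvGrow obstacles gw gh reach).Nodup := PySem.Set.nodup_ofList _
  have hlen := pvUnv_append_list gw gh (pvGrow obstacles gw gh reach) reach hnd
    (pvGrow_sub obstacles gw gh reach)
  have hne : (pvGrow obstacles gw gh reach).length ≠ 0 := by
    simp only [ne_eq, List.length_eq_zero_iff]
    exact ‹¬ grown = []›
  simp only [grown] at *
  omega

def bfs_count_py_alt (sx : Int) (sy : Int) (obstacles : List (List Int)) (gw : Int) (gh : Int) : Int :=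
  if ¬(0 ≤ sx ∧ sx < gw ∧ 0 ≤ sy ∧ sy < gh) ∨ [sx, sy] ∈ obstacles then 0
  else pvLoopB obstacles gw gh [(sx, sy)]

-- ===== PRECONDITION & SPEC =====
def Spec_bfs_count_py (sx : Int) (sy : Int) (obstacles : List (List Int)) (gw : Int) (gh : Int) (out : Int) : Prop := out = bfs_count_py_alt sx sy obstacles gw gh
instance (sx : Int) (sy : Int) (obstacles : List (List Int)) (gw : Int) (gh : Int) (out : Int) : Decidable (Spec_bfs_count_py sx sy obstacles gw gh out) := by unfold Spec_bfs_count_py; infer_instance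

-- ===== CLAIM (what is proved, stated in full; the proofs are below) =====
def Claim_equal_bfs_count_py : Prop := ∀ (sx : Int) (sy : Int) (obstacles : List (List Int)) (gw : Int) (gh : Int), Dom_bfs_count_py sx sy obstacles gw gh → Spec_bfs_count_py sx sy obstacles gw gh (bfs_count_py sx sy obstacles gw gh)

-- ===== LEMMAS AND PROOFS =====

def pvOk (obstacles : List (List Int)) (gw gh : Int) (c : Int × Int) : Prop :=
  pvInB gw gh c = true ∧ pvObs obstacles c = false

inductive pvReach (obstacles : List (List Int)) (gw gh : Int) (s : Int × Int) : Int × Int → Prop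
  | base : pvReach obstacles gw gh s s
  | step (a b : Int × Int) : pvReach obstacles gw gh s a → b ∈ pvNbrs a →
      pvOk obstacles gw gh b → pvReach obstacles gw gh s b

theorem pvReach_mem (obstacles : List (List Int)) (gw gh : Int) (s : Int × Int)
    (V : List (Int × Int)) (hs : s ∈ V)
    (hcl : ∀ a ∈ V, ∀ b ∈ pvNbrs a, pvOk obstacles gw gh b → b ∈ V) :
    ∀ x, pvReach obstacles gw gh s x → x ∈ V := by
  intro x hx
  induction hx with
  | base => exact hs
  | step a b _ hnb hok ih => exact hcl a ih b hnb hok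

-- the state invariant of A's loop
def pvInvA (obstacles : List (List Int)) (gw gh : Int) (s : Int × Int)
    (st : List (Int × Int) × List (Int × Int) × Int) : Prop :=
  st.1.Nodup ∧ s ∈ st.1 ∧ (∀ y ∈ st.2.1, y ∈ st.1) ∧
  (∀ y ∈ st.1, pvOk obstacles gw gh y ∧ pvReach obstacles gw gh s y) ∧
  st.2.2 + 1 = (st.1.length : Int)

theorem pvStepA_props (obstacles : List (List Int)) (gw gh : Int) (s x : Int × Int)
    (hx : pvReach obstacles gw gh s x) :
    ∀ (ns : List (Int × Int)) (st : List (Int × Int) × List (Int × Int) × Int),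
      (∀ n ∈ ns, n ∈ pvNbrs x) → pvInvA obstacles gw gh s st →
      pvInvA obstacles gw gh s (List.foldl (pvStepA obstacles gw gh) st ns) ∧
      (∀ y ∈ st.1, y ∈ (List.foldl (pvStepA obstacles gw gh) st ns).1) ∧
      (∀ y ∈ (List.foldl (pvStepA obstacles gw gh) st ns).1,
          y ∈ st.1 ∨ y ∈ (List.foldl (pvStepA obstacles gw gh) st ns).2.1) ∧
      (∀ y ∈ st.2.1, y ∈ (List.foldl (pvStepA obstacles gw gh) st ns).2.1) ∧
      (∀ n ∈ ns, pvOk obstacles gw gh n → n ∈ (List.foldl (pvStepA obstacles gw gh) st ns).1) := by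
  intro ns
  induction ns with
  | nil =>
    intro st _ hinv
    exact ⟨hinv, fun y h => h, fun y h => Or.inl h, fun y h => h, by simp⟩
  | cons w ws ih =>
    intro st hns hinv
    by_cases hc : (pvInB gw gh w && !pvObs obstacles w && !st.1.contains w) = true
    · -- w is newly visited
      have hnm : w ∉ st.1 := by
        simp only [Bool.and_eq_true, Bool.not_eq_true'] at hc
        intro hm; rw [List.contains_eq_mem] at hc; simp [hm] at hc
      have hok : pvOk obstacles gw gh w := by
        simp only [Bool.and_eq_true, Bool.not_eq_true'] at hc
        exact ⟨hc.1.1, hc.1.2⟩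
      have hstep : pvStepA obstacles gw gh st w = (st.1 ++ [w], st.2.1 ++ [w], st.2.2 + 1) := by
        unfold pvStepA; rw [if_pos hc]
      have hinv' : pvInvA obstacles gw gh s (st.1 ++ [w], st.2.1 ++ [w], st.2.2 + 1) := by
        obtain ⟨h1, h2, h3, h4, h5⟩ := hinv
        refine ⟨?_, by simp [h2], ?_, ?_, ?_⟩
        · refine h1.append (List.nodup_singleton w) ?_
          intro a ha hb
          simp only [List.mem_singleton] at hb
          subst hb; exact hnm ha
        · intro y hy
          simp only [List.mem_append, List.mem_singleton] at hy ⊢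
          rcases hy with h | h
          · exact Or.inl (h3 y h)
          · exact Or.inr h
        · intro y hy
          simp only [List.mem_append, List.mem_singleton] at hy
          rcases hy with h | he
          · exact h4 y h
          · rw [he]
            exact ⟨hok, pvReach.step x w hx (hns w (by simp)) hok⟩
        · simp only [List.length_append, List.length_cons, List.length_nil]; push_cast; omega
      have hmain := ih (st.1 ++ [w], st.2.1 ++ [w], st.2.2 + 1)
        (fun m hm => hns m (by simp [hm])) hinv'
      rw [List.foldl_cons, hstep]
      obtain ⟨i1, i2, i3, i4, i5⟩ := hmain
      refine ⟨i1, ?_, ?_, ?_, ?_⟩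
      · intro y hy; exact i2 y (by simp [hy])
      · intro y hy
        rcases i3 y hy with h | h
        · simp only [List.mem_append, List.mem_singleton] at h
          rcases h with h | he
          · exact Or.inl h
          · rw [he]
            exact Or.inr (i4 w (by simp))
        · exact Or.inr h
      · intro y hy; exact i4 y (by simp [hy])
      · intro m hm hokm
        rcases List.mem_cons.mp hm with he | hm'
        · exact i2 m (by simp [he])
        · exact i5 m hm' hokm
    · -- w skipped: out of bounds, obstacle, or already visited
      have hstep : pvStepA obstacles gw gh st w = st := by
        unfold pvStepA; rw [if_neg hc]
      have hmain := ih st (fun m hm => hns m (by simp [hm])) hinv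
      rw [List.foldl_cons, hstep]
      obtain ⟨i1, i2, i3, i4, i5⟩ := hmain
      refine ⟨i1, i2, i3, i4, ?_⟩
      intro m hm hokm
      rcases List.mem_cons.mp hm with he | hm'
      · -- the guard failed although m is ok, so m was already visited
        rw [← he] at hc
        by_cases hcn : st.1.contains m = true
        · apply i2
          rw [List.contains_eq_mem] at hcn
          simpa using hcn
        · have hnm : m ∉ st.1 := by
            rw [List.contains_eq_mem] at hcn
            simpa using hcn
          exact absurd (by simp [hokm.1, hokm.2, hnm]) hc
      · exact i5 m hm' hokm

theorem pvLoopA_char (obstacles : List (List Int)) (gw gh : Int) (s : Int × Int) :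
    ∀ (v q : List (Int × Int)) (c : Int),
      pvInvA obstacles gw gh s (v, q, c) →
      (∀ a ∈ v, a ∉ q → ∀ b ∈ pvNbrs a, pvOk obstacles gw gh b → b ∈ v) →
      (pvLoopA obstacles gw gh v q c).1.Nodup ∧
      (∀ y, y ∈ (pvLoopA obstacles gw gh v q c).1 ↔ pvReach obstacles gw gh s y) ∧
      (pvLoopA obstacles gw gh v q c).2 + 1 = ((pvLoopA obstacles gw gh v q c).1.length : Int) := by
  intro v q c
  induction v, q, c using pvLoopA.induct obstacles gw gh with
  | case1 v c =>
    intro hinv hcl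
    rw [pvLoopA]
    obtain ⟨h1, h2, _, h4, h5⟩ := hinv
    refine ⟨h1, ?_, h5⟩
    intro y
    constructor
    · intro hy; exact (h4 y hy).2
    · exact pvReach_mem obstacles gw gh s v h2 (fun a ha => hcl a ha (by simp)) y
  | case2 v x qs c st' ih =>
    intro hinv hcl
    obtain ⟨h1, h2, h3, h4, h5⟩ := hinv
    have hxv : x ∈ v := h3 x (by simp)
    have hxr : pvReach obstacles gw gh s x := (h4 x hxv).2
    have hinv0 : pvInvA obstacles gw gh s (v, qs, c) :=
      ⟨h1, h2, fun y hy => h3 y (by simp [hy]), h4, h5⟩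
    have hprops := pvStepA_props obstacles gw gh s x hxr (pvNbrs x) (v, qs, c)
      (fun n hn => hn) hinv0
    obtain ⟨i1, i2, i3, i4, i5⟩ := hprops
    have hcl' : ∀ a ∈ (List.foldl (pvStepA obstacles gw gh) (v, qs, c) (pvNbrs x)).1,
        a ∉ (List.foldl (pvStepA obstacles gw gh) (v, qs, c) (pvNbrs x)).2.1 →
        ∀ b ∈ pvNbrs a, pvOk obstacles gw gh b →
        b ∈ (List.foldl (pvStepA obstacles gw gh) (v, qs, c) (pvNbrs x)).1 := by
      intro a ha hnq b hb hok
      rcases i3 a ha with hav | haq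
      · by_cases hax : a = x
        · subst hax; exact i5 b hb hok
        · have hanq : a ∉ x :: qs := by
            intro hmem
            rcases List.mem_cons.mp hmem with h | h
            · exact hax h
            · exact hnq (i4 a h)
          exact i2 b (hcl a hav hanq b hb hok)
      · exact absurd haq hnq
    have hres := ih i1 hcl'
    rw [pvLoopA]
    exact hres

theorem pvLoopB_char (obstacles : List (List Int)) (gw gh : Int) (s : Int × Int) :
    ∀ (reach : List (Int × Int)),
      reach.Nodup → s ∈ reach →
      (∀ y ∈ reach, pvOk obstacles gw gh y ∧ pvReach obstacles gw gh s y) →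
      ∃ V : List (Int × Int), pvLoopB obstacles gw gh reach = (V.length : Int) - 1 ∧
        V.Nodup ∧ (∀ y, y ∈ V ↔ pvReach obstacles gw gh s y) := by
  intro reach
  induction reach using pvLoopB.induct obstacles gw gh with
  | case1 reach grown hg =>
    intro hnd hs hall
    have hg' : pvGrow obstacles gw gh reach = [] := hg
    rw [pvLoopB, if_pos hg']
    refine ⟨reach, rfl, hnd, ?_⟩
    have hcl : ∀ a ∈ reach, ∀ b ∈ pvNbrs a, pvOk obstacles gw gh b → b ∈ reach := by
      intro a ha b hb hok
      by_contra hbn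
      have hmemf : b ∈ (reach.flatMap pvNbrs).filter
          (fun n => pvInB gw gh n && !pvObs obstacles n && !reach.contains n) := by
        apply List.mem_filter.mpr
        refine ⟨List.mem_flatMap.mpr ⟨a, ha, hb⟩, ?_⟩
        simp [hok.1, hok.2, hbn]
      have hbg : b ∈ pvGrow obstacles gw gh reach := by
        unfold pvGrow; rw [PySem.Set.mem_ofList]; exact hmemf
      rw [hg'] at hbg
      simp at hbg
    intro y
    constructor
    · intro hy; exact (hall y hy).2
    · exact pvReach_mem obstacles gw gh s reach hs hcl y
  | case2 reach grown hg ih =>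
    intro hnd hs hall
    have hg' : ¬ pvGrow obstacles gw gh reach = [] := hg
    rw [pvLoopB, if_neg hg']
    have hsub := pvGrow_sub obstacles gw gh reach
    have hgnd : (pvGrow obstacles gw gh reach).Nodup := PySem.Set.nodup_ofList _
    have hgok : ∀ n ∈ pvGrow obstacles gw gh reach,
        pvOk obstacles gw gh n ∧ pvReach obstacles gw gh s n := by
      intro n hn
      have hn' := hn
      unfold pvGrow at hn'
      rw [PySem.Set.mem_ofList] at hn'
      have hf := List.of_mem_filter hn'
      simp only [Bool.and_eq_true, Bool.not_eq_true'] at hf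
      have hok : pvOk obstacles gw gh n := ⟨hf.1.1, hf.1.2⟩
      obtain ⟨a, ha, hna⟩ := List.mem_flatMap.mp (List.mem_of_mem_filter hn')
      exact ⟨hok, pvReach.step a n (hall a ha).2 hna hok⟩
    apply ih
    · refine hnd.append hgnd ?_
      intro a ha hb
      exact (hsub a hb).2 ha
    · simp [hs]
    · intro y hy
      rcases List.mem_append.mp hy with h | h
      · exact hall y h
      · exact hgok y h

-- ===== VERDICT (by name: the statement is the Claim_ definition above) =====
theorem bfs_count_py_spec : Claim_equal_bfs_count_py := by
  intro sx sy obstacles gw gh _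
  unfold Spec_bfs_count_py bfs_count_py bfs_count_py_alt
  by_cases hg : ¬(0 ≤ sx ∧ sx < gw ∧ 0 ≤ sy ∧ sy < gh) ∨ [sx, sy] ∈ obstacles
  · rw [if_pos hg, if_pos hg]
  · rw [if_neg hg, if_neg hg]
    push_neg at hg
    have hok : pvOk obstacles gw gh (sx, sy) := by
      constructor
      · simp only [pvInB, decide_eq_true_eq]
        exact hg.1
      · unfold pvObs
        simp [List.contains_eq_mem, hg.2]
    have hA := pvLoopA_char obstacles gw gh (sx, sy) [(sx, sy)] [(sx, sy)] 0
      ⟨by simp, by simp, by simp, by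
        intro y hy
        simp only [List.mem_singleton] at hy
        subst hy
        exact ⟨hok, pvReach.base⟩, by simp⟩
      (by intro a ha hna; simp only [List.mem_singleton] at ha; simp [ha] at hna)
    have hB := pvLoopB_char obstacles gw gh (sx, sy) [(sx, sy)] (by simp) (by simp)
      (by intro y hy; simp only [List.mem_singleton] at hy; subst hy; exact ⟨hok, pvReach.base⟩)
    obtain ⟨hAnd, hAmem, hAcount⟩ := hA
    obtain ⟨V, hBval, hVnd, hVmem⟩ := hB
    have hlen : (pvLoopA obstacles gw gh [(sx, sy)] [(sx, sy)] 0).1.length = V.length := by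
      have hperm : List.Perm (pvLoopA obstacles gw gh [(sx, sy)] [(sx, sy)] 0).1 V := by
        rw [List.perm_ext_iff_of_nodup hAnd hVnd]
        intro a; rw [hAmem a, hVmem a]
      exact hperm.length_eq
    rw [hBval]
    omega
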